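-- pv_equiv track=rewrite | github.com/tolgacam/YTPlaylistOrganizer | backend/categorizer.py | _label_from_youtube_categories
-- ===== SOURCE A (Python) =====
-- from typing import Dict, List, Optional
--
-- def _label_from_youtube_categories(categories: Optional[List[str]]) -> Optional[str]:
--     if not categories:
--         return None
--     cats_lower = {c.lower() for c in categories}
--     if "music" in cats_lower:
--         return "Music"
--     if {"education", "science & technology", "howto & style"} & cats_lower:
--         return "Education"
--     if {"news & politics"} & cats_lower:
--         return "News"
--     return None
-- ===== SOURCE B (Python) =====
-- PRIORITY = {
--     "music": 0,
--     "education": 1,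
--     "science & technology": 1,
--     "howto & style": 1,
--     "news & politics": 2,
-- }
--
-- LABELS = ["Music", "Education", "News"]
--
--
-- def _label_from_youtube_categories(categories):
--     if not categories:
--         return None
--     best = None
--     for c in categories:
--         rank = PRIORITY.get(c.lower())
--         if rank is not None and (best is None or rank < best):
--             best = rank
--     return None if best is None else LABELS[best]
-- ===== Notes on version B (the rewrite author's own statement) =====
-- stated objective: alternative
-- what changed: Replaces the three ordered set-intersection branches with a data-driven single pass: a category->rank dict plus a rank->label table, tracking the minimum rank seen over one scan of the list.
import Mathlib
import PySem

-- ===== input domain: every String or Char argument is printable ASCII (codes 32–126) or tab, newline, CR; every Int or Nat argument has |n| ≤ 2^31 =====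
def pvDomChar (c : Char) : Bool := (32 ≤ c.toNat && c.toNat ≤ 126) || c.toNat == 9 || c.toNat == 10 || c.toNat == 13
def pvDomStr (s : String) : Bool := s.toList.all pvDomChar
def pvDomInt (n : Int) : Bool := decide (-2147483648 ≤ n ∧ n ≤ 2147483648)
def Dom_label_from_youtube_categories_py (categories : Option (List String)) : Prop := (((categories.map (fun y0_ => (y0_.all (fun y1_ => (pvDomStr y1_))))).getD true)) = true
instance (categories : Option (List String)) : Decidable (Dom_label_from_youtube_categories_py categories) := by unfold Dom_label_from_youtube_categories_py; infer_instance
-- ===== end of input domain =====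

-- B replaces A's three ordered set-intersection branches by a category→rank dict and a
-- single min-rank scan over the list (objective: alternative decomposition, same cost).

-- ===== PORT A =====
def label_from_youtube_categories_py (categories : Option (List String)) : Option String :=
  match categories with
  | none => none
  | some cs =>
    if cs = [] then none
    else
      let catsLower : PySem.Set String := PySem.Set.ofList (cs.map PySem.Str.lower)
      if "music" ∈ catsLower then some "Music"
      else if PySem.Set.inter (PySem.Set.ofList ["education", "science & technology", "howto & style"]) catsLower ≠ [] then some "Education"
      else if PySem.Set.inter (PySem.Set.ofList ["news & politics"]) catsLower ≠ [] then some "News"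
      else none

-- ===== PORT B =====
def pvPriority : PySem.Dict String Nat :=
  PySem.Dict.ofList [("music", 0), ("education", 1), ("science & technology", 1),
   ("howto & style", 1), ("news & politics", 2)]

def pvLabels : List String := ["Music", "Education", "News"]

-- one step of B's loop: fold the rank of this category (if any) into the running minimum
def pvBestStep (best : Option Nat) (c : String) : Option Nat :=
  match PySem.Dict.get? pvPriority (PySem.Str.lower c) with
  | none => best
  | some r =>
    match best with
    | none => some r
    | some b => if r < b then some r else some b

def label_from_youtube_categories_py_alt (categories : Option (List String)) : Option String :=
  match categories with
  | none => none
  | some cs =>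
    if cs = [] then none
    else
      match cs.foldl pvBestStep none with
      | none => none
      | some b => some (pvLabels.getD b "")  -- b ∈ {0,1,2}, always in range of LABELS

-- ===== PRECONDITION & SPEC =====
def Spec_label_from_youtube_categories_py (categories : Option (List String)) (out : Option String) : Prop := out = label_from_youtube_categories_py_alt categories
instance (categories : Option (List String)) (out : Option String) : Decidable (Spec_label_from_youtube_categories_py categories out) := by unfold Spec_label_from_youtube_categories_py; infer_instance

-- ===== CLAIM (what is proved, stated in full; the proofs are below) =====
def Claim_equal_label_from_youtube_categories_py : Prop := ∀ (categories : Option (List String)), Dom_label_from_youtube_categories_py categories → Spec_label_from_youtube_categories_py categories (label_from_youtube_categories_py categories)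

-- ===== LEMMAS AND PROOFS =====

-- option-valued minimum (none = no rank seen yet)
def pvOMin (a b : Option Nat) : Option Nat :=
  match a, b with
  | none, b => b
  | some x, none => some x
  | some x, some y => some (min x y)

lemma pvOMin_assoc (a b c : Option Nat) : pvOMin (pvOMin a b) c = pvOMin a (pvOMin b c) := by
  cases a <;> cases b <;> cases c <;> simp [pvOMin, Nat.min_assoc]

lemma pvBestStep_eq_oMin (a : Option Nat) (c : String) :
    pvBestStep a c = pvOMin a (PySem.Dict.get? pvPriority (PySem.Str.lower c)) := by
  unfold pvBestStep
  cases h : PySem.Dict.get? pvPriority (PySem.Str.lower c) with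
  | none => cases a <;> simp [pvOMin]
  | some r =>
    cases a with
    | none => simp [pvOMin]
    | some b =>
      simp only [pvOMin]
      split_ifs with hrb <;> (congr 1; omega)

lemma foldl_best_acc (cs : List String) (a : Option Nat) :
    cs.foldl pvBestStep a = pvOMin a (cs.foldl pvBestStep none) := by
  induction cs generalizing a with
  | nil => cases a <;> simp [pvOMin]
  | cons c cs ih =>
    simp only [List.foldl_cons]
    rw [ih (pvBestStep a c), ih (pvBestStep none c),
        pvBestStep_eq_oMin a c, pvBestStep_eq_oMin none c]
    exact pvOMin_assoc _ _ _

-- the three trigger conditions of A, as booleans on the lowered categories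
def pvHasM (cs : List String) : Bool := cs.any (fun c => PySem.Str.lower c == "music")
def pvHasE (cs : List String) : Bool :=
  cs.any (fun c => PySem.Str.lower c == "education" || PySem.Str.lower c == "science & technology"
                 || PySem.Str.lower c == "howto & style")
def pvHasN (cs : List String) : Bool := cs.any (fun c => PySem.Str.lower c == "news & politics")

lemma best_char (cs : List String) :
    cs.foldl pvBestStep none =
      if pvHasM cs then some 0
      else if pvHasE cs then some 1
      else if pvHasN cs then some 2
      else none := by
  induction cs with
  | nil => simp [pvHasM, pvHasE, pvHasN]
  | cons c cs ih =>
    simp only [List.foldl_cons]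
    rw [foldl_best_acc, ih, pvBestStep_eq_oMin]
    have hM : pvHasM (c :: cs) = ((PySem.Str.lower c == "music") || pvHasM cs) := by
      simp [pvHasM]
    have hE : pvHasE (c :: cs) = ((PySem.Str.lower c == "education"
        || PySem.Str.lower c == "science & technology"
        || PySem.Str.lower c == "howto & style") || pvHasE cs) := by
      simp [pvHasE]
    have hN : pvHasN (c :: cs) = ((PySem.Str.lower c == "news & politics") || pvHasN cs) := by
      simp [pvHasN]
    rw [hM, hE, hN]
    by_cases h1 : PySem.Str.lower c = "music"
    · have hg : pvPriority.get? "music" = some 0 := by decide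
      rw [h1, hg]
      simp only [pvOMin]
      split_ifs <;> simp_all
    · by_cases h2 : PySem.Str.lower c = "education"
      · have hg : pvPriority.get? "education" = some 1 := by decide
        rw [h2, hg]
        simp only [pvOMin]
        split_ifs <;> simp_all
      · by_cases h3 : PySem.Str.lower c = "science & technology"
        · have hg : pvPriority.get? "science & technology" = some 1 := by decide
          rw [h3, hg]
          simp only [pvOMin]
          split_ifs <;> simp_all
        · by_cases h4 : PySem.Str.lower c = "howto & style"
          · have hg : pvPriority.get? "howto & style" = some 1 := by decide
            rw [h4, hg]
            simp only [pvOMin]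
            split_ifs <;> simp_all
          · by_cases h5 : PySem.Str.lower c = "news & politics"
            · have hg : pvPriority.get? "news & politics" = some 2 := by decide
              rw [h5, hg]
              simp only [pvOMin]
              split_ifs <;> simp_all
            · have hg : pvPriority.get? (PySem.Str.lower c) = none := by
                have hi : pvPriority.items = [("music", 0), ("education", 1),
                    ("science & technology", 1), ("howto & style", 1), ("news & politics", 2)] := by
                  decide
                simp [PySem.Dict.get?, hi, beq_iff_eq]
                exact ⟨Ne.symm h1, Ne.symm h2, Ne.symm h3, Ne.symm h4, Ne.symm h5⟩
              rw [hg]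
              simp only [pvOMin]
              simp [h1, h2, h3, h4, h5]

-- A's membership/intersection tests expressed through the same booleans
lemma inter_ne_nil_iff (s t : List String) :
    PySem.Set.inter s t ≠ [] ↔ ∃ x ∈ s, x ∈ t := by
  simp [PySem.Set.inter, List.filter_eq_nil_iff]

lemma memM_iff (cs : List String) :
    ("music" ∈ PySem.Set.ofList (cs.map PySem.Str.lower)) ↔ pvHasM cs = true := by
  rw [PySem.Set.mem_ofList]
  simp [pvHasM, List.any_eq_true]

lemma interE_iff (cs : List String) :
    (PySem.Set.inter (PySem.Set.ofList ["education", "science & technology", "howto & style"])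
       (PySem.Set.ofList (cs.map PySem.Str.lower)) ≠ []) ↔ pvHasE cs = true := by
  have hK : PySem.Set.ofList ["education", "science & technology", "howto & style"]
      = ["education", "science & technology", "howto & style"] := by decide
  rw [hK, inter_ne_nil_iff]
  simp only [PySem.Set.mem_ofList, List.mem_map]
  simp [pvHasE, List.any_eq_true]
  aesop

lemma interN_iff (cs : List String) :
    (PySem.Set.inter (PySem.Set.ofList ["news & politics"])
       (PySem.Set.ofList (cs.map PySem.Str.lower)) ≠ []) ↔ pvHasN cs = true := by
  have hK : PySem.Set.ofList ["news & politics"] = ["news & politics"] := by decide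
  rw [hK, inter_ne_nil_iff]
  simp only [PySem.Set.mem_ofList, List.mem_map]
  simp [pvHasN, List.any_eq_true]
  aesop

-- ===== VERDICT (by name: the statement is the Claim_ definition above) =====
theorem label_from_youtube_categories_py_spec : Claim_equal_label_from_youtube_categories_py := by
  intro categories _
  unfold Spec_label_from_youtube_categories_py
  unfold label_from_youtube_categories_py label_from_youtube_categories_py_alt
  cases categories with
  | none => rfl
  | some cs =>
    by_cases hnil : cs = []
    · simp [hnil]
    · simp only [hnil, if_false, best_char]
      by_cases hM : pvHasM cs
      · simp [hM, (memM_iff cs).mpr hM, pvLabels]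
      · have hM' : ¬ ("music" ∈ PySem.Set.ofList (cs.map PySem.Str.lower)) := by
          rw [memM_iff]; exact hM
        by_cases hE : pvHasE cs
        · simp [hM, hM', hE, (interE_iff cs).mpr hE, pvLabels]
        · have hE' := (not_iff_not.mpr (interE_iff cs)).mpr hE
          by_cases hN : pvHasN cs
          · simp [hM, hM', hE, hE', hN, (interN_iff cs).mpr hN, pvLabels]
          · have hN' := (not_iff_not.mpr (interN_iff cs)).mpr hN
            simp [hM, hM', hE, hE', hN, hN']
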